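-- pv_equiv track=rewrite | github.com/Kani-ixgut/bookbot | main.py | num_letters
-- ===== SOURCE A (Python) =====
-- def num_letters(document):
--     letters = {}
--     alphabet = ["a","b","c","d","e","f","g","h","i","j","k","l","m","n","o","p","q","r","s","t","u","v","w","x","y","z"]
--     for letter in alphabet:
--         letters[letter] = 0
--     lowered = document.lower()
--     for letter in lowered:
--         if letter in alphabet:
--             letters[letter] += 1
--     return letters
-- ===== SOURCE B (Python) =====
-- def num_letters(document):
--     low = document.lower()
--     return {c: low.count(c) for c in "abcdefghijklmnopqrstuvwxyz"}
-- ===== Notes on version B (the rewrite author's own statement) =====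
-- stated objective: idiomatic
-- what changed: Replaces the single-pass dict-accumulator loop (init 26 keys, then per-character list-membership test and increment) by 26 independent full scans: a dict comprehension mapping each letter c to document.lower().count(c), with no running accumulator.
import Mathlib
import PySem

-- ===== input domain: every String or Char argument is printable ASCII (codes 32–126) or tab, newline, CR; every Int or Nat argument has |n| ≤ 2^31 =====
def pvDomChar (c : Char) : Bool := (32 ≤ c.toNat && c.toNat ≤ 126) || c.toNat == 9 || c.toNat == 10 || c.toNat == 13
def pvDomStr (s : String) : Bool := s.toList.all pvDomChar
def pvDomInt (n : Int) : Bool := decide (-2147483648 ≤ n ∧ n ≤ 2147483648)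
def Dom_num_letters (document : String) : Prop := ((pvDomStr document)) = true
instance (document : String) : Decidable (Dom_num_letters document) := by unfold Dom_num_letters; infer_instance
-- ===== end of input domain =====

-- B replaces A's single-pass dict-accumulator loop by 26 independent full scans (one str.count per letter); same result, idiomatic.

-- ===== PORT A =====
def pvAlphabet : List String :=
  ["a","b","c","d","e","f","g","h","i","j","k","l","m","n","o","p","q","r","s","t","u","v","w","x","y","z"]

def num_letters (document : String) : List (String × Int) :=
  let letters : PySem.Dict String Int :=
    pvAlphabet.foldl (fun d letter => d.insert letter 0) PySem.Dict.empty
  let lowered := PySem.Str.lower document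
  let letters := lowered.toList.foldl
    (fun d c => if String.ofList [c] ∈ pvAlphabet then d.modify (String.ofList [c]) 0 (· + 1) else d)
    letters
  letters.items

-- ===== PORT B =====
def num_letters_alt (document : String) : List (String × Int) :=
  let low := PySem.Str.lower document
  "abcdefghijklmnopqrstuvwxyz".toList.map
    (fun c => (String.ofList [c], (PySem.Str.count low (String.ofList [c]) : Int)))

-- ===== PRECONDITION & SPEC =====
def Spec_num_letters (document : String) (out : List (String × Int)) : Prop := out = num_letters_alt document
instance (document : String) (out : List (String × Int)) : Decidable (Spec_num_letters document out) := by unfold Spec_num_letters; infer_instance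

-- ===== CLAIM (what is proved, stated in full; the proofs are below) =====
def Claim_equal_num_letters : Prop := ∀ (document : String), Dom_num_letters document → Spec_num_letters document (num_letters document)

-- ===== LEMMAS AND PROOFS =====

-- str.count with a single-character needle is the plain character count (specific to B's use of count).
theorem pvGoSingleton (a : Char) (l : List Char) (fuel acc : Nat) (h : l.length ≤ fuel) :
    PySem.Chars.count.go [a] fuel l acc = acc + l.count a := by
  induction l generalizing fuel acc with
  | nil => cases fuel <;> simp [PySem.Chars.count.go]
  | cons x t ih =>
    cases fuel with
    | zero => simp at h
    | succ n =>
      rw [PySem.Chars.count.go]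
      simp only [List.length_cons] at h
      by_cases hx : a = x
      · subst hx
        simp [List.isPrefixOf, List.count_cons_self, ih n (acc + 1) (by omega)]
        omega
      · simp [List.isPrefixOf, hx, List.count_cons_of_ne (Ne.symm hx), ih n acc (by omega)]

theorem pvCountSingle (s : List Char) (a : Char) : PySem.Chars.count s [a] = s.count a := by
  rw [PySem.Chars.count]
  simpa using pvGoSingleton a s s.length 0 le_rfl

-- the conditional counting loop of A, keys side: it never adds a key
theorem pvKeysFoldlModify (ks : List String) (d : PySem.Dict String Int)
    (h : ∀ k ∈ ks, d.contains k = true) :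
    (ks.foldl (fun d k => d.modify k 0 (· + 1)) d).keys = d.keys := by
  induction ks generalizing d with
  | nil => rfl
  | cons k t ih =>
    simp only [List.foldl_cons]
    rw [ih]
    · exact PySem.Dict.keys_insert_of_contains d _ (h k (by simp))
    · intro k' hk'
      rw [PySem.Dict.modify, PySem.Dict.contains_insert]
      simp [h k' (List.mem_cons_of_mem _ hk')]

-- ===== VERDICT (by name: the statement is the Claim_ definition above) =====
theorem pvCondFold (l : List Char) (d : PySem.Dict String Int) :
    l.foldl (fun d c => if String.ofList [c] ∈ pvAlphabet then d.modify (String.ofList [c]) 0 (· + 1) else d) d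
      = ((l.filter (fun c => decide (String.ofList [c] ∈ pvAlphabet))).map (fun c => String.ofList [c])).foldl
          (fun d k => d.modify k 0 (· + 1)) d := by
  rw [List.foldl_map, List.foldl_filter]
  simp

theorem num_letters_spec : Claim_equal_num_letters := by
  intro document _
  unfold Spec_num_letters num_letters num_letters_alt
  simp only []
  rw [pvCondFold]
  set cs := (PySem.Str.lower document).toList with hcs
  set d0 : PySem.Dict String Int := pvAlphabet.foldl (fun d letter => d.insert letter 0) PySem.Dict.empty with hd0
  set hit := (cs.filter (fun c => decide (String.ofList [c] ∈ pvAlphabet))).map (fun c => String.ofList [c]) with hhit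
  have hcont : ∀ k ∈ hit, d0.contains k = true := by
    intro k hk
    rw [hhit] at hk
    obtain ⟨c, hc, rfl⟩ := List.mem_map.mp hk
    have hmem : String.ofList [c] ∈ pvAlphabet := by simpa using (List.mem_filter.mp hc).2
    revert hmem
    have h26 : ∀ k ∈ pvAlphabet, d0.contains k = true := by rw [hd0]; decide
    exact h26 _
  have hkeys : (hit.foldl (fun d k => d.modify k 0 (· + 1)) d0).keys = pvAlphabet := by
    rw [pvKeysFoldlModify hit d0 hcont, hd0]
    decide
  have hnd : (hit.foldl (fun d k => d.modify k 0 (· + 1)) d0).keys.Nodup := by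
    rw [hkeys]; decide
  rw [PySem.Dict.items_eq_map_keys _ hnd 0, hkeys]
  have halpha : pvAlphabet = "abcdefghijklmnopqrstuvwxyz".toList.map (fun c => String.ofList [c]) := by decide
  rw [halpha, List.map_map]
  apply List.map_congr_left
  intro c hc
  simp only [Function.comp_apply]
  refine Prod.ext rfl ?_
  have hmem : String.ofList [c] ∈ pvAlphabet := by
    rw [halpha]; exact List.mem_map_of_mem hc
  have htl : ∀ x : Char, (String.ofList [x]).toList = [x] := fun x => Eq.symm (String.ofList_eq.mp rfl)
  have hinj : Function.Injective (fun c : Char => String.ofList [c]) := by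
    intro a b h
    have h2 := congrArg String.toList h
    rw [htl, htl] at h2
    simpa using h2
  rw [PySem.Dict.getD_foldl_modify_add_one, hhit,
      List.count_map_of_injective _ _ hinj,
      List.count_filter (by simpa using hmem)]
  have hget0 : d0.getD (String.ofList [c]) 0 = 0 := by
    have h26 : ∀ k ∈ pvAlphabet, d0.getD k 0 = 0 := by rw [hd0]; decide
    exact h26 _ hmem
  rw [hget0, PySem.Str.count_eq, htl, pvCountSingle]
  simp [hcs]
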